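-- pv_equiv track=rewrite | github.com/simonhermansen/AUHack | streamlit_app.py | _resolve_market_selection
-- ===== SOURCE A (Python) =====
-- MARKET_TO_ISO3: dict[str, str] = {
--     "AT": "AUT",
--     "BE": "BEL",
--     "CH": "CHE",
--     "CZ": "CZE",
--     "DE": "DEU",
--     "DK1": "DNK",
--     "DK2": "DNK",
--     "FR": "FRA",
--     "NL": "NLD",
--     "PL": "POL",
-- }
--
-- def _resolve_market_selection(clicked_token: str | None, markets: list[str], current_market: str) -> str | None:
--     if not clicked_token:
--         return None
--
--     if clicked_token in markets:
--         return clicked_token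
--
--     iso_to_markets: dict[str, list[str]] = {}
--     for market in markets:
--         iso = MARKET_TO_ISO3.get(market)
--         if iso is None:
--             continue
--         iso_to_markets.setdefault(iso, []).append(market)
--
--     if clicked_token not in iso_to_markets:
--         return None
--
--     candidates = sorted(iso_to_markets[clicked_token])
--     if len(candidates) == 1:
--         return candidates[0]
--
--     if current_market in candidates:
--         return current_market
--     if "DK1" in candidates:
--         return "DK1"
--     return candidates[0]
-- ===== SOURCE B (Python) =====
-- MARKET_TO_ISO3: dict[str, str] = {
--     "AT": "AUT",
--     "BE": "BEL",
--     "CH": "CHE",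
--     "CZ": "CZE",
--     "DE": "DEU",
--     "DK1": "DNK",
--     "DK2": "DNK",
--     "FR": "FRA",
--     "NL": "NLD",
--     "PL": "POL",
-- }
--
-- def _resolve_market_selection(clicked_token, markets, current_market):
--     if not clicked_token:
--         return None
--     if clicked_token in markets:
--         return clicked_token
--     # Single streaming pass: no index dict, no candidate list, no sort.
--     count = 0
--     best = None
--     has_current = False
--     has_dk1 = False
--     for m in markets:
--         if MARKET_TO_ISO3.get(m) == clicked_token:
--             count += 1
--             if best is None or m < best:
--                 best = m
--             if m == current_market:
--                 has_current = True
--             if m == "DK1":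
--                 has_dk1 = True
--     if count == 0:
--         return None
--     if count == 1:
--         return best
--     if has_current:
--         return current_market
--     if has_dk1:
--         return "DK1"
--     return best
-- ===== Notes on version B (the rewrite author's own statement) =====
-- stated objective: alternative
-- what changed: B replaces A's grouping dict plus sorted candidate list by a single streaming pass over markets that keeps only four scalars (match count, running lexicographic minimum, current_market-seen flag, DK1-seen flag) and decides from those, eliminating the index, the list and the sort.
import Mathlib
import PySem

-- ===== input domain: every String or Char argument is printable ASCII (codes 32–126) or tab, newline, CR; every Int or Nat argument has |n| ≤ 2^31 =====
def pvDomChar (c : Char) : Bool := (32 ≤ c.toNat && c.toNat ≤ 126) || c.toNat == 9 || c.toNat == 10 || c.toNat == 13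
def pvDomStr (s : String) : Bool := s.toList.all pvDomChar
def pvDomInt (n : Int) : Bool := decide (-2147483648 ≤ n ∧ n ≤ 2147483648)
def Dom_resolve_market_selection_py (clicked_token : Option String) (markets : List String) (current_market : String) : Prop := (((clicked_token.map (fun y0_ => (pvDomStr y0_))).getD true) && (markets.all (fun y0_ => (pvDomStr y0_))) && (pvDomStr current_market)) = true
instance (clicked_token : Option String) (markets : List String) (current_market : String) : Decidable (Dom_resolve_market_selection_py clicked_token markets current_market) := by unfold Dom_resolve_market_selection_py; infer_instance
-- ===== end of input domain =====

-- B replaces A's grouping-dict + sort + list tie-break by a single streaming pass keeping only four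
-- scalars (match count, lexicographic minimum, current-market seen, DK1 seen): no index, no list, no sort.

-- shared module constant MARKET_TO_ISO3
def market_to_iso3 : PySem.Dict String String := PySem.Dict.ofList
  [("AT", "AUT"), ("BE", "BEL"), ("CH", "CHE"), ("CZ", "CZE"), ("DE", "DEU"),
   ("DK1", "DNK"), ("DK2", "DNK"), ("FR", "FRA"), ("NL", "NLD"), ("PL", "POL")]

-- ===== PORT A =====
def resolve_market_selection_py (clicked_token : Option String) (markets : List String) (current_market : String) : Option String :=
  match clicked_token with
  | none => none
  | some t =>
    if t = "" then none
    else if markets.contains t then some t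
    else
      -- iso_to_markets built by the for-loop; setdefault(iso, []).append(m) = d[iso] = d.get(iso, []) + [m]
      let d : PySem.Dict String (List String) :=
        markets.foldl (fun d m =>
          match market_to_iso3.get? m with
          | none => d
          | some iso => d.modify iso [] (· ++ [m])) PySem.Dict.empty
      if d.contains t then
        let candidates := PySem.List.sorted (d.getD t []) (fun x => x) false
        if candidates.length = 1 then candidates.head?
        else if candidates.contains current_market then some current_market
        else if candidates.contains "DK1" then some "DK1"
        else candidates.head?
      else none

-- ===== PORT B =====
def resolve_market_selection_py_alt (clicked_token : Option String) (markets : List String) (current_market : String) : Option String :=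
  match clicked_token with
  | none => none
  | some t =>
    if t = "" then none
    else if markets.contains t then some t
    else
      -- single streaming pass: (count, best, has_current, has_dk1)
      let st : Nat × Option String × Bool × Bool :=
        markets.foldl (fun acc m =>
          if market_to_iso3.get? m == some t then
            (acc.1 + 1,
             (match acc.2.1 with
              | none => some m
              | some b => if m < b then some m else some b),
             acc.2.2.1 || (m == current_market),
             acc.2.2.2 || (m == "DK1"))
          else acc) (0, none, false, false)
      if st.1 = 0 then none
      else if st.1 = 1 then st.2.1
      else if st.2.2.1 then some current_market
      else if st.2.2.2 then some "DK1"
      else st.2.1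

-- ===== PRECONDITION & SPEC =====
def Spec_resolve_market_selection_py (clicked_token : Option String) (markets : List String) (current_market : String) (out : Option String) : Prop := out = resolve_market_selection_py_alt clicked_token markets current_market
instance (clicked_token : Option String) (markets : List String) (current_market : String) (out : Option String) : Decidable (Spec_resolve_market_selection_py clicked_token markets current_market out) := by unfold Spec_resolve_market_selection_py; infer_instance

-- ===== CLAIM (what is proved, stated in full; the proofs are below) =====
def Claim_equal_resolve_market_selection_py : Prop := ∀ (clicked_token : Option String) (markets : List String) (current_market : String), Dom_resolve_market_selection_py clicked_token markets current_market → Spec_resolve_market_selection_py clicked_token markets current_market (resolve_market_selection_py clicked_token markets current_market)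

-- ===== LEMMAS AND PROOFS =====

-- A's grouping loop step
def pvStep (d : PySem.Dict String (List String)) (m : String) : PySem.Dict String (List String) :=
  match market_to_iso3.get? m with
  | none => d
  | some iso => d.modify iso [] (· ++ [m])

-- the grouping loop's lookup at t is exactly the filtered market list
lemma pvGetD_loop (ms : List String) (d : PySem.Dict String (List String)) (t : String) :
    (ms.foldl pvStep d).getD t [] = d.getD t [] ++ ms.filter (fun m => market_to_iso3.get? m == some t) := by
  induction ms generalizing d with
  | nil => simp
  | cons m ms ih =>
    simp only [List.foldl_cons, List.filter_cons, ih]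
    unfold pvStep
    cases h : market_to_iso3.get? m with
    | none => simp
    | some iso =>
      by_cases hiso : iso = t
      · subst hiso
        simp
      · have hne : ¬t = iso := fun hh => hiso hh.symm
        simp [PySem.Dict.getD_modify, hne, hiso]

lemma pvContains_loop (ms : List String) (d : PySem.Dict String (List String)) (t : String) :
    (ms.foldl pvStep d).contains t
      = (d.contains t || !(ms.filter (fun m => market_to_iso3.get? m == some t)).isEmpty) := by
  induction ms generalizing d with
  | nil => simp
  | cons m ms ih =>
    simp only [List.foldl_cons, List.filter_cons, ih]
    unfold pvStep
    cases h : market_to_iso3.get? m with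
    | none => simp
    | some iso =>
      by_cases hiso : iso = t
      · subst hiso
        simp [PySem.Dict.contains_modify]
      · have hne : (t == iso) = false := by
          simp only [beq_eq_false_iff_ne, ne_eq]
          exact fun hh => hiso hh.symm
        simp [PySem.Dict.contains_modify, hne, hiso]

-- B's running-minimum update
def pvMin (b : Option String) (m : String) : Option String :=
  match b with
  | none => some m
  | some b => if m < b then some m else some b

-- B's unconditional per-match update
def pvUpd (cur : String) (acc : Nat × Option String × Bool × Bool) (m : String) : Nat × Option String × Bool × Bool :=
  (acc.1 + 1, pvMin acc.2.1 m, acc.2.2.1 || (m == cur), acc.2.2.2 || (m == "DK1"))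

lemma pvScan_spec (cur : String) (f : List String) :
    ∀ (c : Nat) (b : Option String) (h1 h2 : Bool),
    f.foldl (pvUpd cur) (c, b, h1, h2)
      = (c + f.length, f.foldl pvMin b, h1 || f.contains cur, h2 || f.contains "DK1") := by
  induction f with
  | nil => simp
  | cons m rest ih =>
    intro c b h1 h2
    simp only [List.foldl_cons, List.length_cons, List.contains_cons, pvUpd, ih]
    refine Prod.ext (by omega) (Prod.ext rfl (Prod.ext ?_ ?_)) <;>
      simp [Bool.or_assoc, BEq.comm]

lemma pvMinFold_some (f : List String) : ∀ (b : String),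
    ∃ x, f.foldl pvMin (some b) = some x ∧ (x = b ∨ x ∈ f) ∧ x ≤ b ∧ ∀ y ∈ f, x ≤ y := by
  induction f with
  | nil => exact fun b => ⟨b, rfl, Or.inl rfl, le_refl _, by simp⟩
  | cons m rest ih =>
    intro b
    have hb' : pvMin (some b) m = some (if m < b then m else b) := by
      by_cases h0 : m < b <;> simp [pvMin, h0]
    obtain ⟨x, hx, hmem, hle, hall⟩ := ih (if m < b then m else b)
    refine ⟨x, by rw [List.foldl_cons, hb', hx], ?_, ?_, ?_⟩
    · rcases hmem with h | h
      · subst h; split_ifs with h0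
        · exact Or.inr (List.mem_cons_self ..)
        · exact Or.inl rfl
      · exact Or.inr (List.mem_cons_of_mem _ h)
    · refine le_trans hle ?_
      split_ifs with h0
      · exact le_of_lt h0
      · exact le_refl _
    · intro y hy
      rcases List.mem_cons.mp hy with h | h
      · subst h
        refine le_trans hle ?_
        split_ifs with h0
        · exact le_refl _
        · exact le_of_not_gt h0
      · exact hall y h

-- B's running minimum equals the head of A's sorted candidate list
lemma pvBest_eq_head_sorted (f : List String) :
    f.foldl pvMin none = (PySem.List.sorted f (fun x => x) false).head? := by
  cases f with
  | nil => rfl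
  | cons a rest =>
    have hne : (a :: rest : List String) ≠ [] := by simp
    have hsne : PySem.List.sorted (a :: rest) (fun x => x) false ≠ [] := by
      intro h
      exact hne ((PySem.List.sorted_eq_nil_iff _ _ _).mp h)
    obtain ⟨m, tl, hs⟩ := List.exists_cons_of_ne_nil hsne
    have hm_mem : m ∈ (a :: rest : List String) := by
      have : m ∈ PySem.List.sorted (a :: rest) (fun x => x) false := by
        rw [hs]; exact List.mem_cons_self ..
      exact (PySem.List.mem_sorted _ _ _ _).mp this
    have hm_le : ∀ y ∈ (a :: rest : List String), m ≤ y :=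
      PySem.List.key_head_sorted_le _ (fun x => x) hs
    obtain ⟨x, hx, hmem, hle, hall⟩ := pvMinFold_some rest a
    have hx_mem : x ∈ (a :: rest : List String) := by
      rcases hmem with h | h
      · subst h; exact List.mem_cons_self ..
      · exact List.mem_cons_of_mem _ h
    have hx_le : ∀ y ∈ (a :: rest : List String), x ≤ y := by
      intro y hy
      rcases List.mem_cons.mp hy with h | h
      · subst h; exact hle
      · exact hall y h
    have : x = m := le_antisymm (hx_le m hm_mem) (hm_le x hx_mem)
    rw [List.foldl_cons]
    show List.foldl pvMin (pvMin none a) rest = _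
    rw [show pvMin none a = some a from rfl, hx, hs, this]
    rfl

-- ===== VERDICT (by name: the statement is the Claim_ definition above) =====
theorem resolve_market_selection_py_spec : Claim_equal_resolve_market_selection_py := by
  intro clicked_token markets current_market _
  unfold Spec_resolve_market_selection_py resolve_market_selection_py resolve_market_selection_py_alt
  cases clicked_token with
  | none => rfl
  | some t =>
    dsimp only
    by_cases ht : t = ""
    · simp [ht]
    · rw [if_neg ht, if_neg ht]
      by_cases hm : markets.contains t = true
      · rw [if_pos hm, if_pos hm]
      · rw [if_neg hm, if_neg hm]
        have hstepA : (fun d m =>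
          match market_to_iso3.get? m with
          | none => d
          | some iso => d.modify iso [] (· ++ [m])) = pvStep := rfl
        have hstepB : (fun (acc : Nat × Option String × Bool × Bool) m =>
          if market_to_iso3.get? m == some t then
            (acc.1 + 1,
             (match acc.2.1 with
              | none => some m
              | some b => if m < b then some m else some b),
             acc.2.2.1 || (m == current_market),
             acc.2.2.2 || (m == "DK1"))
          else acc)
          = (fun acc m => if market_to_iso3.get? m == some t then pvUpd current_market acc m else acc) := rfl
        rw [hstepA, hstepB, ← List.foldl_filter]
        simp only [pvContains_loop, pvGetD_loop, PySem.Dict.getD_empty,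
          PySem.Dict.contains_empty, List.nil_append, Bool.false_or]
        set f := markets.filter (fun m => market_to_iso3.get? m == some t) with hf
        rw [pvScan_spec]
        simp only [Nat.zero_add, Bool.false_or]
        by_cases hfe : f = []
        · simp [hfe]
        · have hlen : f.length ≠ 0 := fun h => hfe (List.length_eq_zero_iff.mp h)
          have hne : (!f.isEmpty) = true := by simp [hfe]
          rw [if_pos hne, if_neg hlen]
          have hslen : (PySem.List.sorted f (fun x => x) false).length = f.length :=
            PySem.List.length_sorted ..
          have hcontains : ∀ s : String,
              (PySem.List.sorted f (fun x => x) false).contains s = f.contains s := by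
            intro s
            by_cases h : s ∈ f
            · simp [h, (PySem.List.mem_sorted _ _ _ _).mpr h]
            · simp
          rw [hslen, pvBest_eq_head_sorted, hcontains, hcontains]
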